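-- pv_equiv track=rewrite | github.com/heima-labs/ha-heima-core | custom_components/heima/runtime/reactions/security_presence_simulation.py | _projected_evening_span_min
-- ===== SOURCE A (Python) =====
-- from typing import Any
--
-- def _projected_evening_span_min(
--
--     candidate: dict[str, Any],
--     selected: list[dict[str, Any]],
-- ) -> int | None:
--     if not selected:
--         return None
--     mins = [int(item.get("scheduled_min") or 0) for item in selected]
--     mins.append(int(candidate.get("scheduled_min") or 0))
--     return max(mins) - min(mins)
-- ===== SOURCE B (Python) =====
-- def _projected_evening_span_min(candidate, selected):
--     if not selected:
--         return None
--     it = iter(selected)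
--     lo = hi = int(next(it).get("scheduled_min") or 0)
--     for item in it:
--         v = int(item.get("scheduled_min") or 0)
--         if v < lo:
--             lo = v
--         elif v > hi:
--             hi = v
--     cv = int(candidate.get("scheduled_min") or 0)
--     if cv < lo:
--         lo = cv
--     elif cv > hi:
--         hi = cv
--     return hi - lo
-- ===== Notes on version B (the rewrite author's own statement) =====
-- stated objective: alternative
-- what changed: Replaces the list comprehension plus separate max() and min() scans with a single fused pass maintaining running lo/hi accumulators, never materializing the list of minutes.
import Mathlib
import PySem

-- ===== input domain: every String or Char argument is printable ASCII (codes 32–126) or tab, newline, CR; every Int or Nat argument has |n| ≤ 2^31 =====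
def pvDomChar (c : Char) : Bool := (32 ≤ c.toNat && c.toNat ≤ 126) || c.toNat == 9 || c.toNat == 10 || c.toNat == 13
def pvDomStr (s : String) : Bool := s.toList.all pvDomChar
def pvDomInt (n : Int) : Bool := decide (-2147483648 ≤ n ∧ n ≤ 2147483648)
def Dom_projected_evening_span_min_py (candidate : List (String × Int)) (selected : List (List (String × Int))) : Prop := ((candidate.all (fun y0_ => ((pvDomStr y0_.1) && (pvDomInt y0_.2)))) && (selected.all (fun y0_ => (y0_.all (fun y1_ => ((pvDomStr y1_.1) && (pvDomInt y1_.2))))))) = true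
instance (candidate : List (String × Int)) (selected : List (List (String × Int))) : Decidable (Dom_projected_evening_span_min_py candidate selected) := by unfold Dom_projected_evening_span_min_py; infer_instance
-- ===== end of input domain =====

-- B replaces the list comprehension plus separate max()/min() scans by one fused pass
-- with running lo/hi accumulators (alternative: same O(n) cost, no intermediate list).

-- shared value extraction: int(item.get("scheduled_min") or 0)  (`or 0`: None → 0, 0 → 0, v → v)
def pvSched (item : List (String × Int)) : Int :=
  match (PySem.Dict.mk item).get? "scheduled_min" with
  | none => 0
  | some v => if v == 0 then 0 else v

-- ===== PORT A =====
def projected_evening_span_min_py (candidate : List (String × Int)) (selected : List (List (String × Int))) : Option Int :=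
  if selected = [] then none
  else
    let mins := selected.map (fun item => pvSched item)
    let mins := mins ++ [pvSched candidate]
    match PySem.List.max? mins (fun x => x), PySem.List.min? mins (fun x => x) with
    | some hi, some lo => some (hi - lo)
    | _, _ => none

-- ===== PORT B =====
-- one update step of the fused loop: if v < lo then lower lo, elif v > hi raise hi
def pvStep (p : Int × Int) (v : Int) : Int × Int :=
  if v < p.1 then (v, p.2) else if p.2 < v then (p.1, v) else p

def projected_evening_span_min_py_alt (candidate : List (String × Int)) (selected : List (List (String × Int))) : Option Int :=
  match selected with
  | [] => none
  | first :: rest =>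
    let v0 := pvSched first
    let p := rest.foldl (fun acc item => pvStep acc (pvSched item)) (v0, v0)
    let q := pvStep p (pvSched candidate)
    some (q.2 - q.1)

-- ===== PRECONDITION & SPEC =====
def Spec_projected_evening_span_min_py (candidate : List (String × Int)) (selected : List (List (String × Int))) (out : Option Int) : Prop := out = projected_evening_span_min_py_alt candidate selected
instance (candidate : List (String × Int)) (selected : List (List (String × Int))) (out : Option Int) : Decidable (Spec_projected_evening_span_min_py candidate selected out) := by unfold Spec_projected_evening_span_min_py; infer_instance

-- ===== CLAIM (what is proved, stated in full; the proofs are below) =====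
def Claim_equal_projected_evening_span_min_py : Prop := ∀ (candidate : List (String × Int)) (selected : List (List (String × Int))), Dom_projected_evening_span_min_py candidate selected → Spec_projected_evening_span_min_py candidate selected (projected_evening_span_min_py candidate selected)

-- ===== LEMMAS AND PROOFS =====

-- the fused step is the componentwise (min, max) step
theorem pvStep_eq (p : Int × Int) (v : Int) (h : p.1 ≤ p.2) :
    pvStep p v = (min p.1 v, max p.2 v) := by
  unfold pvStep
  obtain ⟨a, b⟩ := p
  simp only at h ⊢
  split_ifs with h1 h2 <;> simp [Prod.ext_iff] <;> omega

-- the fused fold computes both running folds at once (accumulators a ≤ b)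
theorem pvFold_eq (l : List Int) (a b : Int) (h : a ≤ b) :
    l.foldl pvStep (a, b) = (l.foldl min a, l.foldl max b) := by
  induction l generalizing a b with
  | nil => rfl
  | cons x t ih =>
    simp only [List.foldl_cons, pvStep_eq (a, b) x h]
    exact ih _ _ (le_trans (min_le_left a x) (le_trans h (le_max_left b x)))

theorem foldl_min_le_foldl_max (l : List Int) (a b : Int) (h : a ≤ b) :
    l.foldl min a ≤ l.foldl max b := by
  induction l generalizing a b with
  | nil => exact h
  | cons x t ih =>
    exact ih _ _ (le_trans (min_le_left a x) (le_trans h (le_max_left b x)))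

-- ===== VERDICT (by name: the statement is the Claim_ definition above) =====
theorem projected_evening_span_min_py_spec : Claim_equal_projected_evening_span_min_py := by
  intro candidate selected _
  unfold Spec_projected_evening_span_min_py projected_evening_span_min_py projected_evening_span_min_py_alt
  match selected with
  | [] => rfl
  | first :: rest =>
    simp only [if_neg (List.cons_ne_nil first rest), List.map_cons, List.cons_append]
    rw [PySem.List.max?_id_cons, PySem.List.min?_id_cons]
    simp only [List.foldl_append, List.foldl_map, List.foldl_cons, List.foldl_nil]
    have h1 : (rest.foldl (fun acc item => pvStep acc (pvSched item)) (pvSched first, pvSched first))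
        = ((rest.map pvSched).foldl min (pvSched first), (rest.map pvSched).foldl max (pvSched first)) := by
      rw [← List.foldl_map]
      exact pvFold_eq _ _ _ le_rfl
    rw [h1, pvStep_eq _ _ (foldl_min_le_foldl_max _ _ _ le_rfl)]
    simp [List.foldl_map]
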